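-- pv_equiv track=rewrite | github.com/davidxk/Algorithm-Implementations | dp/py/TestSeatArrangement.py | bruteForceRoundTable
-- ===== SOURCE A (Python) =====
-- import itertools
--
-- def bruteForceRoundTable(matrix):
--     maxUtil = 0
--     for perm in itertools.permutations(range(len(matrix))):
--         util = 0
--         for i in range(len(matrix)):
--             util += matrix[perm[i]][perm[i - 1]]
--         maxUtil = max(util, maxUtil)
--     return maxUtil
-- ===== SOURCE B (Python) =====
-- def bruteForceRoundTable(matrix):
--     n = len(matrix)
--     if n == 0:
--         return 0
--     dp = []  # dp[mask] = row; row[last] = best weight of a simple path over mask's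
--              # vertices that starts at 0 and ends at last (None if impossible)
--     for mask in range(1 << n):
--         row = [None] * n
--         if mask == 1:
--             row[0] = 0
--         elif mask & 1:
--             for last in range(1, n):
--                 if (mask >> last) & 1:
--                     pm = mask ^ (1 << last)
--                     best = None
--                     for prev in range(n):
--                         if (pm >> prev) & 1:
--                             v = dp[pm][prev]
--                             if v is not None:
--                                 c = v + matrix[last][prev]
--                                 if best is None or c > best:
--                                     best = c
--                     row[last] = best
--         dp.append(row)
--     res = 0
--     for last in range(n):
--         v = dp[-1][last]
--         if v is not None:
--             res = max(res, v + matrix[0][last])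
--     return res
-- ===== Notes on version B (the rewrite author's own statement) =====
-- stated objective: faster
-- what changed: Replaced the n!-permutation brute force by a Held-Karp bitmask dynamic program: best simple path from seat 0 over each vertex subset and end seat, closed into a cycle at the end and maxed with 0.
import Mathlib
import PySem

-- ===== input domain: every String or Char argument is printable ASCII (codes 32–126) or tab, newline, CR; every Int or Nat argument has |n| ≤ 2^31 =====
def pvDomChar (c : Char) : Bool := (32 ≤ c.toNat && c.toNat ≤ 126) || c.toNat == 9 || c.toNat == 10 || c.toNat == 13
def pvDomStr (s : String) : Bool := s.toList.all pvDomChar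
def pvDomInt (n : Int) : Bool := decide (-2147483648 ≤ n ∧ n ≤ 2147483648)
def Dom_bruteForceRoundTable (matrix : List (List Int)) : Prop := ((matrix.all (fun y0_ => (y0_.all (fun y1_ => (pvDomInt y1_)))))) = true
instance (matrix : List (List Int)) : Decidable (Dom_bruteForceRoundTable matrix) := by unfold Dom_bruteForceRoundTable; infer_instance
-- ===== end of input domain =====

-- B replaces A's O(n!·n) scan over all permutations by a Held-Karp bitmask DP, O(2^n·n²).

-- ===== PORT A =====
-- literal transliteration of A: fold max over itertools.permutations(range(n)),
-- each util summed by index with Python's negative-index wrap at i = 0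
def bruteForceRoundTable (matrix : List (List Int)) : Int :=
  (PySem.List.permutations (PySem.List.pyRange 0 (matrix.length : Int) 1)
      (PySem.List.pyRange 0 (matrix.length : Int) 1).length).foldl
    (fun maxUtil perm =>
      let util := (PySem.List.pyRange 0 (matrix.length : Int) 1).foldl
        (fun util i =>
          util + PySem.List.pyGetD
                   (PySem.List.pyGetD matrix (PySem.List.pyGetD perm i 0) [])
                   (PySem.List.pyGetD perm (i - 1) 0) 0) 0
      max util maxUtil) 0

-- ===== PORT B =====
-- one row of the DP table: row[last] = best path over mask's vertices from 0 to last
-- (shift amounts `.toNat` are exact: `last`/`prev` come from range(...) so are ≥ 0)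
-- the inner `best` loop of Source B (pm = mask with `last`'s bit cleared)
def hkBestB (matrix : List (List Int)) (dp : List (List (Option Int)))
    (pm : Int) (last : Int) : Option Int :=
  (PySem.List.pyRange 0 (matrix.length : Int) 1).foldl (fun best prev =>
    if PySem.Int.band (pm >>> prev.toNat) 1 ≠ 0 then
      match PySem.List.pyGetD (PySem.List.pyGetD dp pm []) prev none with
      | none => best
      | some v =>
        let c := v + PySem.List.pyGetD (PySem.List.pyGetD matrix last []) prev 0
        match best with
        | none => some c
        | some b => if c > b then some c else some b
    else best) none

def hkRowB (matrix : List (List Int)) (dp : List (List (Option Int))) (mask : Int) :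
    List (Option Int) :=
  let row : List (Option Int) := List.replicate matrix.length none
  if mask = 1 then PySem.List.pySetD row 0 (some 0)
  else if PySem.Int.band mask 1 ≠ 0 then
    (PySem.List.pyRange 1 (matrix.length : Int) 1).foldl (fun row last =>
      if PySem.Int.band (mask >>> last.toNat) 1 ≠ 0 then
        PySem.List.pySetD row last
          (hkBestB matrix dp (PySem.Int.bxor mask ((1 : Int) <<< last.toNat)) last)
      else row) row
  else row

-- the final closing loop of B (res = max over end seats of path + closing edge)
def hkResB (matrix : List (List Int)) (dp : List (List (Option Int))) : Int :=
  (PySem.List.pyRange 0 (matrix.length : Int) 1).foldl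
    (fun res last =>
      match PySem.List.pyGetD (PySem.List.pyGetD dp (-1) []) last none with
      | none => res
      | some v =>
        max res (v + PySem.List.pyGetD (PySem.List.pyGetD matrix 0 []) last 0)) 0

def bruteForceRoundTable_alt (matrix : List (List Int)) : Int :=
  if matrix.length = 0 then 0
  else hkResB matrix ((PySem.List.pyRange 0 ((1 : Int) <<< matrix.length) 1).foldl
    (fun dp mask => dp ++ [hkRowB matrix dp mask]) ([] : List (List (Option Int))))

-- ===== PRECONDITION & SPEC =====
-- Exactly where Python A returns (no IndexError): with n rows, every row before the
-- last needs length ≥ n, the last row length ≥ n-1, and for n = 1 the row needs ≥ 1.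
def Pre_bruteForceRoundTable (matrix : List (List Int)) : Prop :=
  (∀ row ∈ matrix.dropLast, matrix.length ≤ row.length) ∧
  (∀ row ∈ matrix, matrix.length ≤ row.length + 1) ∧
  (matrix.length = 1 → ∀ row ∈ matrix, 1 ≤ row.length)

instance (matrix : List (List Int)) : Decidable (Pre_bruteForceRoundTable matrix) := by
  unfold Pre_bruteForceRoundTable; infer_instance

def pvWitness_bruteForceRoundTable : List (List Int) := [[1, 2], [3, 4]]

def Spec_bruteForceRoundTable (matrix : List (List Int)) (out : Int) : Prop :=
  out = bruteForceRoundTable_alt matrix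
instance (matrix : List (List Int)) (out : Int) : Decidable (Spec_bruteForceRoundTable matrix out) := by
  unfold Spec_bruteForceRoundTable; infer_instance

-- ===== CLAIM (what is proved, stated in full; the proofs are below) =====
def Claim_equal_bruteForceRoundTable : Prop := ∀ (matrix : List (List Int)), Dom_bruteForceRoundTable matrix → Pre_bruteForceRoundTable matrix → Spec_bruteForceRoundTable matrix (bruteForceRoundTable matrix)

-- ===== LEMMAS AND PROOFS =====

-- weight of the directed edge whose successor seat is `a` and predecessor seat is `b`
def wN (matrix : List (List Int)) (a b : Nat) : Int :=
  PySem.List.pyGetD (PySem.List.pyGetD matrix (a : Int) []) (b : Int) 0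
def wI (matrix : List (List Int)) (a b : Int) : Int :=
  PySem.List.pyGetD (PySem.List.pyGetD matrix a []) b 0

-- chain weight of a seating order: Σ over consecutive pairs of w(successor, predecessor)
def chainW {α : Type} (w : α → α → Int) : List α → Int
  | [] => 0
  | [_] => 0
  | a :: b :: t => w b a + chainW w (b :: t)

-- full cycle weight (chain + closing edge from last back to first)
def cycW {α : Type} (w : α → α → Int) (d : α) (l : List α) : Int :=
  chainW w l + w (l.headD d) (l.getLastD d)

-- the DP value specification, defined by the recursion the table satisfies
def hkG (matrix : List (List Int)) : Nat → Nat → Option Int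
  | mask, last =>
    if mask = 1 then (if last = 0 then some (0 : Int) else none)
    else if h0 : mask.testBit 0 then
      if h : 1 ≤ last ∧ last < matrix.length ∧ mask.testBit last then
        (List.range matrix.length).foldl (fun best prev =>
          if (mask ^^^ 2 ^ last).testBit prev then
            match hkG matrix (mask ^^^ 2 ^ last) prev with
            | none => best
            | some v =>
              let c := v + wN matrix last prev
              match best with
              | none => some c
              | some b => if c > b then some c else some b
          else best) none
      else none
    else none
  termination_by mask _ => mask
  decreasing_by
    refine Nat.lt_of_testBit last ?_ h.2.2 ?_
    · simp [Nat.testBit_xor, Nat.testBit_two_pow, h.2.2]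
    · intro j hj
      have : last ≠ j := Nat.ne_of_lt hj
      simp [Nat.testBit_xor, Nat.testBit_two_pow, this]

-- a simple path over exactly the vertices of `mask`, from seat 0 to seat `last`
def isPath (n : Nat) (mask last : Nat) (l : List Nat) : Prop :=
  l.Nodup ∧ l.head? = some 0 ∧ l.getLast? = some last ∧
  (∀ x, x ∈ l ↔ (x < n ∧ mask.testBit x = true))

-- ---------- generic fold bounds ----------

theorem foldl_maxflip_le {α : Type} (l : List α) (f : α → Int) (init c : Int)
    (h0 : init ≤ c) (h : ∀ x ∈ l, f x ≤ c) :
    l.foldl (fun a x => max (f x) a) init ≤ c := by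
  induction l generalizing init with
  | nil => simpa using h0
  | cons y t ih =>
    exact ih _ (max_le (h y (by simp)) h0) (fun x hx => h x (by simp [hx]))

theorem le_foldl_maxflip {α : Type} (l : List α) (f : α → Int) (init : Int) :
    init ≤ l.foldl (fun a x => max (f x) a) init ∧
    ∀ x ∈ l, f x ≤ l.foldl (fun a x => max (f x) a) init := by
  induction l generalizing init with
  | nil => simp
  | cons y t ih =>
    refine ⟨le_trans (le_max_right _ _) (ih (max (f y) init)).1, ?_⟩
    intro x hx
    rcases List.mem_cons.1 hx with rfl | hx
    · exact le_trans (le_max_left _ _) (ih (max (f x) init)).1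
    · exact (ih (max (f y) init)).2 x hx

-- ---------- the candidate-max fold (B's inner loop shape) ----------

def candFold (cand : Nat → Option Int) (l : List Nat) (o : Option Int) : Option Int :=
  l.foldl (fun best prev =>
    match cand prev with
    | none => best
    | some c => match best with
                | none => some c
                | some b => if c > b then some c else some b) o

theorem candFold_some_mono (cand : Nat → Option Int) (l : List Nat) (b : Int) :
    ∃ v, candFold cand l (some b) = some v ∧ b ≤ v := by
  induction l generalizing b with
  | nil => exact ⟨b, rfl, le_refl b⟩
  | cons x t ih =>
    simp only [candFold, List.foldl_cons]
    cases hcx : cand x with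
    | none => simpa [candFold] using ih b
    | some c =>
      by_cases hcb : c > b
      · obtain ⟨v, hv, hcv⟩ := ih c
        exact ⟨v, by simpa [candFold, hcb] using hv, le_trans (le_of_lt hcb) hcv⟩
      · obtain ⟨v, hv, hbv⟩ := ih b
        exact ⟨v, by simpa [candFold, hcb] using hv, hbv⟩

theorem candFold_attain (cand : Nat → Option Int) (l : List Nat) (o : Option Int) (v : Int)
    (h : candFold cand l o = some v) :
    (∃ x ∈ l, cand x = some v) ∨ o = some v := by
  induction l generalizing o with
  | nil => exact Or.inr h
  | cons x t ih =>
    simp only [candFold, List.foldl_cons] at h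
    cases hcx : cand x with
    | none =>
      rw [hcx] at h
      rcases ih o h with ⟨y, hy, hcy⟩ | rfl
      · exact Or.inl ⟨y, by simp [hy], hcy⟩
      · exact Or.inr rfl
    | some c =>
      rw [hcx] at h
      cases o with
      | none =>
        rcases ih (some c) h with ⟨y, hy, hcy⟩ | hc
        · exact Or.inl ⟨y, by simp [hy], hcy⟩
        · exact Or.inl ⟨x, by simp, by rw [hcx, hc]⟩
      | some b =>
        by_cases hcb : c > b
        · simp only [hcb, if_pos] at h
          rcases ih (some c) h with ⟨y, hy, hcy⟩ | hc
          · exact Or.inl ⟨y, by simp [hy], hcy⟩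
          · exact Or.inl ⟨x, by simp, by rw [hcx, hc]⟩
        · simp only [hcb, if_false] at h
          rcases ih (some b) h with ⟨y, hy, hcy⟩ | hc
          · exact Or.inl ⟨y, by simp [hy], hcy⟩
          · exact Or.inr hc

theorem candFold_ub (cand : Nat → Option Int) (l : List Nat) (o : Option Int) (v : Int)
    (h : candFold cand l o = some v) :
    (∀ x ∈ l, ∀ c, cand x = some c → c ≤ v) ∧ (∀ b, o = some b → b ≤ v) := by
  induction l generalizing o with
  | nil =>
    refine ⟨by simp, fun b hb => ?_⟩
    simp only [candFold, List.foldl_nil] at h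
    rw [hb] at h; injection h with h; omega
  | cons x t ih =>
    simp only [candFold, List.foldl_cons] at h
    cases hcx : cand x with
    | none =>
      rw [hcx] at h
      obtain ⟨h1, h2⟩ := ih o h
      refine ⟨fun y hy c hc => ?_, h2⟩
      rcases List.mem_cons.1 hy with rfl | hy
      · rw [hcx] at hc; cases hc
      · exact h1 y hy c hc
    | some c =>
      rw [hcx] at h
      have step : ∀ o' : Option Int,
          (match o' with
            | none => some c
            | some b => if c > b then some c else some b) = some (match o' with
            | none => c
            | some b => max c b) := by
        intro o'; cases o' with
        | none => rfl
        | some b => by_cases hcb : c > b <;> simp [hcb] <;> omega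
      rw [step o] at h
      obtain ⟨h1, h2⟩ := ih _ h
      have hcv : c ≤ v := le_trans (by cases o <;> simp) (h2 _ rfl)
      refine ⟨fun y hy c' hc' => ?_, fun b hb => ?_⟩
      · rcases List.mem_cons.1 hy with rfl | hy
        · rw [hcx] at hc'; injection hc' with hc'; omega
        · exact h1 y hy c' hc'
      · subst hb
        exact le_trans (by simp) (h2 _ rfl)

theorem candFold_isSome (cand : Nat → Option Int) (l : List Nat) (o : Option Int)
    (x : Nat) (hx : x ∈ l) (c : Int) (hc : cand x = some c) :
    ∃ v, candFold cand l o = some v := by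
  induction l generalizing o with
  | nil => cases hx
  | cons y t ih =>
    simp only [candFold, List.foldl_cons]
    rcases List.mem_cons.1 hx with rfl | hx
    · rw [hc]
      cases o with
      | none =>
        obtain ⟨v, hv, _⟩ := candFold_some_mono cand t c
        exact ⟨v, hv⟩
      | some b =>
        by_cases hcb : c > b
        · simp only [hcb, if_pos]
          obtain ⟨v, hv, _⟩ := candFold_some_mono cand t c
          exact ⟨v, hv⟩
        · simp only [hcb, if_false]
          obtain ⟨v, hv, _⟩ := candFold_some_mono cand t b
          exact ⟨v, hv⟩
    · cases hcy : cand y with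
      | none => exact ih _ hx
      | some cy =>
        cases o with
        | none =>
          obtain ⟨v, hv, _⟩ := candFold_some_mono cand t cy
          exact ⟨v, hv⟩
        | some b =>
          by_cases hcb : cy > b
          · simp only [hcb, if_pos]
            obtain ⟨v, hv, _⟩ := candFold_some_mono cand t cy
            exact ⟨v, hv⟩
          · simp only [hcb, if_false]
            obtain ⟨v, hv, _⟩ := candFold_some_mono cand t b
            exact ⟨v, hv⟩

-- ---------- chain / cycle weight lemmas ----------

theorem chainW_append_singleton {α : Type} (w : α → α → Int) (d : α) (l : List α) (x : α)
    (h : l ≠ []) : chainW w (l ++ [x]) = chainW w l + w x (l.getLastD d) := by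
  induction l with
  | nil => simp at h
  | cons a t ih =>
    cases t with
    | nil => simp [chainW]
    | cons b t2 =>
      have := ih (by simp)
      simp only [List.cons_append, chainW] at this ⊢
      rw [this]
      simp [List.getLastD]
      ring

theorem chainW_map {α β : Type} (w : β → β → Int) (f : α → β) (l : List α) :
    chainW w (l.map f) = chainW (fun a b => w (f a) (f b)) l := by
  induction l with
  | nil => rfl
  | cons a t ih =>
    cases t with
    | nil => rfl
    | cons b t2 =>
      simp only [List.map_cons, chainW] at ih ⊢
      rw [ih]

theorem chainW_append {α : Type} (w : α → α → Int) (d : α) (a b : List α)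
    (ha : a ≠ []) (hb : b ≠ []) :
    chainW w (a ++ b) = chainW w a + w (b.headD d) (a.getLastD d) + chainW w b := by
  induction b generalizing a with
  | nil => simp at hb
  | cons y t ih =>
    cases t with
    | nil =>
      have := chainW_append_singleton w d a y ha
      simp [this, chainW]
    | cons z t2 =>
      have h1 : a ++ y :: z :: t2 = (a ++ [y]) ++ z :: t2 := by simp
      rw [h1, ih (a ++ [y]) (by simp) (by simp)]
      rw [chainW_append_singleton w d a y ha]
      have h2 : (a ++ [y]).getLastD d = y := by simp
      have h3 : chainW w (y :: z :: t2) = w z y + chainW w (z :: t2) := rfl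
      rw [h2, h3]
      simp
      ring

theorem cycW_rotate {α : Type} (w : α → α → Int) (d : α) (a b : List α) :
    cycW w d (a ++ b) = cycW w d (b ++ a) := by
  rcases eq_or_ne a [] with rfl | ha
  · simp
  rcases eq_or_ne b [] with rfl | hb
  · simp
  unfold cycW
  rw [chainW_append w d a b ha hb, chainW_append w d b a hb ha]
  have h1 : (a ++ b).headD d = a.headD d := by
    cases a with | nil => simp at ha | cons x t => simp
  have h2 : (b ++ a).headD d = b.headD d := by
    cases b with | nil => simp at hb | cons x t => simp
  have h3 : (a ++ b).getLastD d = b.getLastD d := by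
    rw [List.getLastD_eq_getLast?, List.getLast?_append_of_ne_nil a hb, ← List.getLastD_eq_getLast?]
  have h4 : (b ++ a).getLastD d = a.getLastD d := by
    rw [List.getLastD_eq_getLast?, List.getLast?_append_of_ne_nil b ha, ← List.getLastD_eq_getLast?]
  rw [h1, h2, h3, h4]
  ring

theorem hkG_eq_candFold (matrix : List (List Int)) (mask last : Nat)
    (h1 : mask ≠ 1) (h0 : mask.testBit 0 = true)
    (hg : 1 ≤ last ∧ last < matrix.length ∧ mask.testBit last = true) :
    hkG matrix mask last = candFold
      (fun prev => if (mask ^^^ 2 ^ last).testBit prev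
        then (hkG matrix (mask ^^^ 2 ^ last) prev).map (· + wN matrix last prev) else none)
      (List.range matrix.length) none := by
  rw [hkG]
  simp only [h1, h0, hg, if_false, if_true, dite_true, dite_false, and_self]
  unfold candFold
  refine PySem.List.foldl_congr_mem _ _ _ _ ?_
  intro best prev _
  by_cases hb : (mask ^^^ 2 ^ last).testBit prev
  · simp only [hb, if_true]
    cases hkG matrix (mask ^^^ 2 ^ last) prev with
    | none => rfl
    | some v => cases best with | none => rfl | some b => rfl
  · simp only [hb, if_false]
    rfl

theorem testBit_one_iff (x : Nat) : (1 : Nat).testBit x = true ↔ x = 0 := by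
  have h2 : (1 : Nat) = 2 ^ 0 := rfl
  rw [h2, Nat.testBit_two_pow]
  simp [eq_comm]

theorem pm_testBit (mask last : Nat) (hl : mask.testBit last = true) (x : Nat) :
    (mask ^^^ 2 ^ last).testBit x = (mask.testBit x && !(decide (x = last))) := by
  rw [Nat.testBit_xor, Nat.testBit_two_pow]
  by_cases hx : x = last
  · subst hx; simp [hl]
  · simp [hx, Ne.symm hx]

theorem hkG_attain (matrix : List (List Int)) (hn : 0 < matrix.length) :
    ∀ mask last v, hkG matrix mask last = some v →
      ∃ l, isPath matrix.length mask last l ∧ chainW (wN matrix) l = v := by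
  intro mask
  induction mask using Nat.strong_induction_on with
  | _ mask ih =>
    intro last v hv
    by_cases h1 : mask = 1
    · subst h1
      rw [hkG] at hv
      by_cases hl : last = 0
      · subst hl
        simp only [if_pos rfl, if_true] at hv
        have hv0 : v = 0 := by
          injection hv with hv; omega
        subst hv0
        refine ⟨[0], ⟨by simp, rfl, rfl, fun x => ?_⟩, rfl⟩
        constructor
        · intro hx
          simp at hx
          subst hx
          exact ⟨hn, by simpa using (testBit_one_iff 0).2 rfl⟩
        · intro ⟨_, hb⟩
          simp [(testBit_one_iff x).1 hb]
      · rw [if_pos rfl, if_neg hl] at hv; cases hv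
    · by_cases h0 : mask.testBit 0
      case neg =>
        rw [hkG, if_neg h1, dif_neg h0] at hv; cases hv
      by_cases hg : 1 ≤ last ∧ last < matrix.length ∧ mask.testBit last = true
      case neg =>
        rw [hkG, if_neg h1, dif_pos h0, dif_neg hg] at hv; cases hv
      rw [hkG_eq_candFold matrix mask last h1 h0 hg] at hv
      rcases candFold_attain _ _ _ _ hv with ⟨prev, hprev, hcand⟩ | hnone
      · by_cases hb : (mask ^^^ 2 ^ last).testBit prev
        case neg => simp [hb] at hcand
        simp only [hb, if_true] at hcand
        cases hG : hkG matrix (mask ^^^ 2 ^ last) prev with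
        | none => rw [hG] at hcand; cases hcand
        | some v' =>
          rw [hG] at hcand
          have hvv : v = v' + wN matrix last prev := by
            simp at hcand; omega
          have hlt : mask ^^^ 2 ^ last < mask := by
            refine Nat.lt_of_testBit last ?_ hg.2.2 ?_
            · simp [pm_testBit mask last hg.2.2]
            · intro j hj
              have : last ≠ j := Nat.ne_of_lt hj
              simp [pm_testBit mask last hg.2.2, Ne.symm this]
          obtain ⟨l', ⟨hnd, hhd, hlast', hmem⟩, hchain⟩ := ih _ hlt prev v' hG
          have hl'ne : l' ≠ [] := by
            intro hcon; rw [hcon] at hhd; cases hhd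
          have hlastmem : last ∉ l' := by
            intro hcon
            have := (hmem last).1 hcon
            rw [pm_testBit mask last hg.2.2] at this
            simp at this
          refine ⟨l' ++ [last], ⟨?_, ?_, ?_, ?_⟩, ?_⟩
          · simp [List.nodup_append, hnd]
            intro a ha hcon; subst hcon; exact hlastmem ha
          · rw [List.head?_append_of_ne_nil _ hl'ne] -- placeholder name
            exact hhd
          · simp [List.getLast?_concat]
          · intro x
            rw [List.mem_append]
            constructor
            · rintro (hx | hx)
              · obtain ⟨hxn, hxb⟩ := (hmem x).1 hx
                rw [pm_testBit mask last hg.2.2] at hxb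
                simp at hxb
                exact ⟨hxn, hxb.1⟩
              · simp at hx; subst hx
                exact ⟨hg.2.1, hg.2.2⟩
            · rintro ⟨hxn, hxb⟩
              by_cases hxl : x = last
              · right; simp [hxl]
              · left
                refine (hmem x).2 ⟨hxn, ?_⟩
                rw [pm_testBit mask last hg.2.2]
                simp [hxl, hxb]
          · rw [chainW_append_singleton (wN matrix) 0 l' last hl'ne]
            have : l'.getLastD 0 = prev := by
              rw [List.getLastD_eq_getLast?, hlast']; rfl
            rw [this, hchain, hvv]
      · cases hnone

theorem xor_two_pow_lt (mask last : Nat) (h : mask.testBit last = true) :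
    mask ^^^ 2 ^ last < mask := by
  refine Nat.lt_of_testBit last ?_ h ?_
  · simp [pm_testBit mask last h]
  · intro j hj
    have hne : last ≠ j := Nat.ne_of_lt hj
    simp [pm_testBit mask last h, Ne.symm hne]

theorem hkG_complete (matrix : List (List Int)) (hn : 0 < matrix.length) :
    ∀ mask, (∀ x, mask.testBit x = true → x < matrix.length) →
      ∀ last l, isPath matrix.length mask last l →
      ∃ v, hkG matrix mask last = some v ∧ chainW (wN matrix) l ≤ v := by
  intro mask
  induction mask using Nat.strong_induction_on with
  | _ mask ih =>
    intro hmask last l ⟨hnd, hhd, hlast, hmem⟩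
    have hlne : l ≠ [] := by intro hcon; rw [hcon] at hhd; cases hhd
    have h0mem : (0 : Nat) ∈ l := by
      cases l with
      | nil => cases hhd
      | cons a t => simp at hhd; subst hhd; simp
    have hlastmem : last ∈ l := List.mem_of_getLast? hlast
    have hbit0 : mask.testBit 0 = true := ((hmem 0).1 h0mem).2
    have hbitlast : mask.testBit last = true := ((hmem last).1 hlastmem).2
    have hlastn : last < matrix.length := ((hmem last).1 hlastmem).1
    rcases eq_or_ne l [0] with rfl | hl0
    · -- the singleton path: mask must be 1, last must be 0
      have hlast0 : last = 0 := by
        simp at hlast; omega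
      subst hlast0
      have hmask1 : mask = 1 := by
        apply Nat.eq_of_testBit_eq
        intro i
        by_cases hi : i = 0
        · subst hi
          rw [hbit0, (testBit_one_iff 0).2 rfl]
        · have hnotmem : i ∉ ([0] : List Nat) := by simp [hi]
          have hfalse : mask.testBit i = false := by
            by_contra hb
            simp only [Bool.not_eq_false] at hb
            exact hnotmem ((hmem i).2 ⟨hmask i hb, hb⟩)
          have h1i : (1 : Nat).testBit i = false := by
            rw [Bool.eq_false_iff]
            intro hb
            exact hi ((testBit_one_iff i).1 hb)
          rw [hfalse, h1i]
      subst hmask1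
      refine ⟨0, ?_, by simp [chainW]⟩
      rw [hkG]
      simp
    · -- l has at least two elements: peel the final seat
      have hlen2 : 2 ≤ l.length := by
        rcases l with _ | ⟨a, _ | ⟨b, t⟩⟩
        · cases hhd
        · simp at hhd; subst hhd
          simp at hlast
          exfalso; exact hl0 (by simp [hlast])
        · simp
      have hsplit : l.dropLast ++ [l.getLast hlne] = l := List.dropLast_concat_getLast hlne
      set l' := l.dropLast with hl'def
      have hgl : l.getLast hlne = last := by
        rw [← Option.some_inj, ← List.getLast?_eq_some_getLast, hlast]
      rw [hgl] at hsplit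
      have hl'ne : l' ≠ [] := by
        intro hcon
        rw [hcon] at hsplit
        simp at hsplit
        rw [← hsplit] at hlen2
        simp at hlen2
      have hndapp : (l' ++ [last]).Nodup := by rw [hsplit]; exact hnd
      have hlastnotmem : last ∉ l' := by
        rw [List.nodup_append] at hndapp
        intro hcon
        exact hndapp.2.2 last hcon last (by simp) rfl
      have hhd' : l'.head? = some 0 := by
        rw [← hsplit] at hhd
        rwa [List.head?_append_of_ne_nil _ hl'ne] at hhd
      have h0mem' : (0 : Nat) ∈ l' := by
        cases hq : l' with
        | nil => exact absurd hq hl'ne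
        | cons a t => rw [hq] at hhd'; simp at hhd'; subst hhd'; simp
      have hlastpos : 1 ≤ last := by
        rcases Nat.eq_zero_or_pos last with h | h
        · exfalso; rw [h] at hlastnotmem; exact hlastnotmem h0mem'
        · exact h
      have hmask1 : mask ≠ 1 := by
        intro hcon
        have := (hmem last).1 hlastmem
        rw [hcon] at this
        have : last = 0 := (testBit_one_iff last).1 this.2
        omega
      have hg : 1 ≤ last ∧ last < matrix.length ∧ mask.testBit last = true :=
        ⟨hlastpos, hlastn, hbitlast⟩
      rw [hkG_eq_candFold matrix mask last hmask1 hbit0 hg]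
      set pm := mask ^^^ 2 ^ last with hpmdef
      have hmem' : ∀ x, x ∈ l' ↔ (x < matrix.length ∧ pm.testBit x = true) := by
        intro x
        rw [hpmdef, pm_testBit mask last hbitlast]
        constructor
        · intro hx
          have hxl : x ∈ l := by rw [← hsplit]; exact List.mem_append_left _ hx
          have hxne : x ≠ last := by intro hcon; subst hcon; exact hlastnotmem hx
          obtain ⟨h1, h2⟩ := (hmem x).1 hxl
          simp [h1, h2, hxne]
        · intro hx
          simp at hx
          obtain ⟨h1, h2, h3⟩ := hx
          have hxl : x ∈ l := (hmem x).2 ⟨h1, h2⟩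
          rw [← hsplit] at hxl
          rcases List.mem_append.1 hxl with hx' | hx'
          · exact hx'
          · simp at hx'; exact absurd hx' h3
      set prev := l'.getLastD 0 with hprevdef
      have hlast' : l'.getLast? = some prev := by
        rw [hprevdef, List.getLastD_eq_getLast?]
        cases hq : l'.getLast? with
        | none => rw [List.getLast?_eq_none_iff] at hq; exact absurd hq hl'ne
        | some z => rfl
      have hnd' : l'.Nodup := (List.nodup_append.1 hndapp).1
      have hprevmem : prev ∈ l' := List.mem_of_getLast? hlast'
      have hprevn : prev < matrix.length := ((hmem' prev).1 hprevmem).1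
      have hprevbit : pm.testBit prev = true := ((hmem' prev).1 hprevmem).2
      have hpmlt : pm < mask := xor_two_pow_lt mask last hbitlast
      have hpmmask : ∀ x, pm.testBit x = true → x < matrix.length := by
        intro x hx
        rw [hpmdef, pm_testBit mask last hbitlast] at hx
        simp at hx
        exact hmask x hx.1
      obtain ⟨v', hG', hle'⟩ := ih pm hpmlt hpmmask prev l' ⟨hnd', hhd', hlast', hmem'⟩
      have hcand : (fun p => if pm.testBit p = true
          then (hkG matrix pm p).map (· + wN matrix last p) else none) prev
          = some (v' + wN matrix last prev) := by
        simp [hprevbit, hG']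
      obtain ⟨v, hvfold⟩ := candFold_isSome
        (fun p => if pm.testBit p = true
          then (hkG matrix pm p).map (· + wN matrix last p) else none)
        (List.range matrix.length) none prev (List.mem_range.2 hprevn) _ hcand
      refine ⟨v, hvfold, ?_⟩
      have hub := (candFold_ub _ _ _ _ hvfold).1 prev (List.mem_range.2 hprevn) _ hcand
      have hchain : chainW (wN matrix) l = chainW (wN matrix) l' + wN matrix last prev := by
        rw [← hsplit, chainW_append_singleton (wN matrix) 0 l' last hl'ne, hprevdef]
      rw [hchain]
      omega

-- ---------- A-side characterisation ----------

theorem chain_fold (matrix : List (List Int)) :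
    ∀ (l : List Int), l ≠ [] → ∀ (c : Int),
    (PySem.List.pyRange 1 (l.length : Int) 1).foldl
      (fun util i =>
        util + PySem.List.pyGetD
                 (PySem.List.pyGetD matrix (PySem.List.pyGetD l i 0) [])
                 (PySem.List.pyGetD l (i - 1) 0) 0) c = c + chainW (wI matrix) l := by
  intro l
  induction l using List.reverseRecOn with
  | nil => intro h; simp at h
  | append_singleton l' x ih =>
    intro _ c
    rcases eq_or_ne l' [] with rfl | hne
    · simp [PySem.List.pyRange_one_eq_nil, chainW]
    have h1len : (1 : Int) ≤ (l'.length : Int) := by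
      have := List.length_pos_iff.2 hne; omega
    have hlen : ((l' ++ [x]).length : Int) = (l'.length : Int) + 1 := by simp
    rw [hlen, PySem.List.pyRange_one_succ_right (by omega), List.foldl_append]
    have hcong : (PySem.List.pyRange 1 (l'.length : Int) 1).foldl
        (fun util i =>
          util + PySem.List.pyGetD
                   (PySem.List.pyGetD matrix (PySem.List.pyGetD (l' ++ [x]) i 0) [])
                   (PySem.List.pyGetD (l' ++ [x]) (i - 1) 0) 0) c
        = (PySem.List.pyRange 1 (l'.length : Int) 1).foldl
        (fun util i =>
          util + PySem.List.pyGetD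
                   (PySem.List.pyGetD matrix (PySem.List.pyGetD l' i 0) [])
                   (PySem.List.pyGetD l' (i - 1) 0) 0) c := by
      refine PySem.List.foldl_congr_mem _ _ _ _ ?_
      intro acc i hi
      have hi' := PySem.List.mem_pyRange_one.1 hi
      have e1 : PySem.List.pyGetD (l' ++ [x]) i 0 = PySem.List.pyGetD l' i 0 := by
        rw [PySem.List.pyGetD_eq_getElem (l' ++ [x]) 0 (by omega) (by rw [hlen]; omega),
            PySem.List.pyGetD_eq_getElem l' 0 (by omega) (by omega)]
        exact List.getElem_append_left (by omega)
      have e2 : PySem.List.pyGetD (l' ++ [x]) (i - 1) 0 = PySem.List.pyGetD l' (i - 1) 0 := by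
        rw [PySem.List.pyGetD_eq_getElem (l' ++ [x]) 0 (by omega) (by rw [hlen]; omega),
            PySem.List.pyGetD_eq_getElem l' 0 (by omega) (by omega)]
        exact List.getElem_append_left (by omega)
      rw [e1, e2]
    rw [hcong, ih hne]
    have e3 : PySem.List.pyGetD (l' ++ [x]) ((l'.length : Int)) 0 = x := by
      rw [PySem.List.pyGetD_eq_getElem (l' ++ [x]) 0 (by omega) (by rw [hlen]; omega)]
      simp
    have e4 : PySem.List.pyGetD (l' ++ [x]) ((l'.length : Int) - 1) 0 = l'.getLastD 0 := by
      rw [PySem.List.pyGetD_eq_getElem (l' ++ [x]) 0 (by omega) (by rw [hlen]; omega)]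
      have ht : ((l'.length : Int) - 1).toNat = l'.length - 1 := by omega
      rw [List.getElem_append_left (by omega)]
      simp only [ht]
      rw [← List.getLast_eq_getElem hne]
      rw [List.getLastD_eq_getLast?, List.getLast?_eq_getLast_of_ne_nil hne]
      rfl
    simp only [List.foldl_cons, List.foldl_nil]
    rw [e3, e4, chainW_append_singleton (wI matrix) 0 l' x hne]
    show c + chainW (wI matrix) l' + wI matrix x (l'.getLastD 0)
      = c + (chainW (wI matrix) l' + wI matrix x (l'.getLastD 0))
    ring

theorem utilA_eq (matrix : List (List Int)) (p : List Int) (hp : p ≠ []) :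
    (PySem.List.pyRange 0 (p.length : Int) 1).foldl
      (fun util i =>
        util + PySem.List.pyGetD
                 (PySem.List.pyGetD matrix (PySem.List.pyGetD p i 0) [])
                 (PySem.List.pyGetD p (i - 1) 0) 0) 0 = cycW (wI matrix) 0 p := by
  have h1len : (1 : Int) ≤ (p.length : Int) := by
    have := List.length_pos_iff.2 hp; omega
  rw [PySem.List.pyRange_one_append 0 1 (p.length : Int) (by omega) h1len, List.foldl_append]
  have hsing : PySem.List.pyRange 0 1 1 = [0] := by
    have := PySem.List.pyRange_one_singleton (a := 0)
    simpa using this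
  rw [hsing]
  simp only [List.foldl_cons, List.foldl_nil]
  rw [chain_fold matrix p hp]
  have e1 : PySem.List.pyGetD p 0 0 = p.headD 0 := by
    cases p with
    | nil => simp at hp
    | cons a t => rw [PySem.List.pyGetD_zero_cons]; rfl
  have e2 : PySem.List.pyGetD p (0 - 1) 0 = p.getLastD 0 := by
    show PySem.List.pyGetD p (-1) 0 = p.getLastD 0
    rw [PySem.List.pyGetD_neg_one p 0 hp, List.getLastD_eq_getLast?,
        List.getLast?_eq_getLast_of_ne_nil hp]
    rfl
  rw [e1, e2]
  unfold cycW wI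
  ring

theorem mem_permutations_self {α : Type} [DecidableEq α] (xs p : List α)
    (hx : xs.Nodup) (hp : p.Perm xs) : p ∈ PySem.List.permutations xs xs.length := by
  induction p generalizing xs with
  | nil =>
    have : xs = [] := (List.Perm.nil_eq hp).symm
    subst this
    simp [PySem.List.permutations_zero]
  | cons a t ih =>
    have halen : xs.length = t.length + 1 := by
      rw [← hp.length_eq]; simp
    rw [halen, PySem.List.permutations_succ]
    have hmem : a ∈ xs := hp.mem_iff.1 (by simp)
    obtain ⟨i, hi, hxi⟩ := List.mem_iff_getElem.mp hmem
    refine List.mem_flatMap.2 ⟨i, List.mem_range.2 hi, ?_⟩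
    have hxi? : xs[i]? = some a := by
      rw [List.getElem?_eq_getElem hi, hxi]
    rw [hxi?]
    refine List.mem_map.2 ⟨t, ?_, rfl⟩
    have hperm : (a :: xs.eraseIdx i).Perm xs := PySem.List.perm_cons_eraseIdx xs hxi?
    have ht : t.Perm (xs.eraseIdx i) := (hp.trans hperm.symm).cons_inv
    have hlen : (xs.eraseIdx i).length = t.length := by
      rw [List.length_eraseIdx_of_lt hi, halen]; simp
    rw [← hlen]
    exact ih (xs.eraseIdx i) (hx.eraseIdx i) ht

-- ---------- B-side implementation = hkG ----------

theorem shift_and_one (m i : Nat) : (m >>> i) &&& 1 = if m.testBit i then 1 else 0 := by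
  have hdef : m.testBit i = (1 &&& m >>> i != 0) := rfl
  rw [hdef, Nat.and_one_is_mod, Nat.and_comm, Nat.and_one_is_mod]
  rcases Nat.mod_two_eq_zero_or_one (m >>> i) with h | h <;> simp [h]

theorem band_shift_cond (K p : Nat) :
    (PySem.Int.band ((K : Int) >>> ((p : Nat) : Int)) 1 ≠ 0) ↔ K.testBit p = true := by
  rw [Int.shiftRight_natCast]
  have h1 : (1 : Int) = ((1 : Nat) : Int) := rfl
  rw [h1, PySem.Int.band_natCast, shift_and_one]
  cases h : K.testBit p <;> simp [h]

theorem cast_one_shiftLeft (j : Nat) : (1 : Int) <<< j = ((2 ^ j : Nat) : Int) := by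
  rw [Int.natCast_pow]
  have : ((2 ^ j : Nat) : Int) = ((1 <<< j : Nat) : Int) := by
    rw [Nat.shiftLeft_eq]; push_cast; ring
  rw [← Int.natCast_pow, this, Int.natCast_shiftLeft]
  rfl

theorem writeFold_spec (c : Int → Prop) [DecidablePred c] (g : Int → Option Int) :
    ∀ (b : Nat) (row0 : List (Option Int)), b ≤ row0.length →
      ((PySem.List.pyRange 1 (b : Int) 1).foldl
        (fun row i => if c i then PySem.List.pySetD row i (g i) else row) row0).length
        = row0.length ∧
      ∀ j : Nat, j < row0.length →
        PySem.List.pyGetD ((PySem.List.pyRange 1 (b : Int) 1).foldl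
          (fun row i => if c i then PySem.List.pySetD row i (g i) else row) row0) (↑j) none
        = if (1 ≤ j ∧ j < b) ∧ c ↑j then g ↑j else PySem.List.pyGetD row0 (↑j) none := by
  intro b
  induction b with
  | zero =>
    intro row0 hb
    rw [PySem.List.pyRange_one_eq_nil (by omega)]
    refine ⟨rfl, fun j hj => ?_⟩
    rw [if_neg (by omega)]
    simp
  | succ b ih =>
    intro row0 hb
    rcases Nat.eq_zero_or_pos b with rfl | hbpos
    · rw [show ((0 + 1 : Nat) : Int) = 1 by norm_num, PySem.List.pyRange_one_eq_nil (by omega)]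
      refine ⟨rfl, fun j hj => ?_⟩
      rw [if_neg (by omega)]
      simp
    have hsucc : ((b + 1 : Nat) : Int) = (b : Int) + 1 := by push_cast; ring
    rw [hsucc, PySem.List.pyRange_one_succ_right (by omega), List.foldl_append]
    obtain ⟨ihlen, ihent⟩ := ih row0 (by omega)
    simp only [List.foldl_cons, List.foldl_nil]
    by_cases hc : c ↑b
    · rw [if_pos hc]
      refine ⟨by rw [PySem.List.length_pySetD, ihlen], fun j hj => ?_⟩
      rw [PySem.List.pyGetD_pySetD_natCast _ b j _ none (by omega)]
      by_cases hjb : j = b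
      · subst hjb
        rw [if_pos rfl, if_pos ⟨⟨hbpos, by omega⟩, hc⟩]
      · rw [if_neg hjb, ihent j hj]
        by_cases hgood : (1 ≤ j ∧ j < b) ∧ c ↑j
        · rw [if_pos hgood, if_pos ⟨⟨hgood.1.1, by omega⟩, hgood.2⟩]
        · rw [if_neg hgood, if_neg ?_]
          intro ⟨⟨hj1, hjb1⟩, hcj⟩
          exact hgood ⟨⟨hj1, by omega⟩, hcj⟩
    · rw [if_neg hc]
      refine ⟨ihlen, fun j hj => ?_⟩
      rw [ihent j hj]
      by_cases hjb : j = b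
      · subst hjb
        rw [if_neg (by omega), if_neg (fun h => hc h.2)]
      · by_cases hgood : (1 ≤ j ∧ j < b) ∧ c ↑j
        · rw [if_pos hgood, if_pos ⟨⟨hgood.1.1, by omega⟩, hgood.2⟩]
        · rw [if_neg hgood, if_neg ?_]
          intro ⟨⟨hj1, hjb1⟩, hcj⟩
          exact hgood ⟨⟨hj1, by omega⟩, hcj⟩

theorem bestFold_eq (matrix : List (List Int)) (k j : Nat) (hjn : j < matrix.length)
    (hbit : k.testBit j = true)
    (dp : List (List (Option Int)))
    (hdp : dp = (List.range k).map (fun m => (List.range matrix.length).map (hkG matrix m))) :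
    hkBestB matrix dp (PySem.Int.bxor (k : Int) ((1 : Int) <<< ((j : Int)).toNat)) ((j : Int))
    = candFold (fun p => if (k ^^^ 2 ^ j).testBit p = true
        then (hkG matrix (k ^^^ 2 ^ j) p).map (· + wN matrix j p) else none)
      (List.range matrix.length) none := by
  have htn : ((j : Int)).toNat = j := Int.toNat_natCast j
  have hxor : PySem.Int.bxor (k : Int) ((1 : Int) <<< j)
      = ((k ^^^ 2 ^ j : Nat) : Int) := by
    rw [cast_one_shiftLeft, PySem.Int.bxor_natCast]
  have hpmlt : k ^^^ 2 ^ j < k := xor_two_pow_lt k j hbit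
  unfold hkBestB
  simp only [Int.toNat_natCast, hxor]
  rw [PySem.List.pyRange_zero_natCast, List.foldl_map]
  unfold candFold
  refine PySem.List.foldl_congr_mem _ _ _ _ ?_
  intro best p hp
  have hpn : p < matrix.length := List.mem_range.1 hp
  simp only [hxor, Int.toNat_natCast]
  have hread : PySem.List.pyGetD (PySem.List.pyGetD dp ((k ^^^ 2 ^ j : Nat) : Int) [])
      ((p : Nat) : Int) none = hkG matrix (k ^^^ 2 ^ j) p := by
    simp only [hdp, PySem.List.pyGetD_natCast]
    rw [PySem.List.getD_map_range _ _ _ _ hpmlt, PySem.List.getD_map_range _ _ _ _ hpn]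
  by_cases hb : (k ^^^ 2 ^ j).testBit p = true
  · rw [if_pos ((band_shift_cond (k ^^^ 2 ^ j) p).2 hb), hread]
    simp only [if_pos hb]
    cases hkG matrix (k ^^^ 2 ^ j) p with
    | none => rfl
    | some v => cases best with | none => rfl | some b => rfl
  · rw [if_neg (fun hcon => hb ((band_shift_cond (k ^^^ 2 ^ j) p).1 hcon))]
    simp only [if_neg hb]

theorem hkRow_eq (matrix : List (List Int)) (k : Nat)
    (dp : List (List (Option Int)))
    (hdp : dp = (List.range k).map (fun m => (List.range matrix.length).map (hkG matrix m))) :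
    hkRowB matrix dp (k : Int) = (List.range matrix.length).map (hkG matrix k) := by
  unfold hkRowB
  simp only []
  by_cases hk1 : k = 1
  · subst hk1
    rw [if_pos (by norm_num : ((1 : Nat) : Int) = 1)]
    rw [show (0 : Int) = ((0 : Nat) : Int) from rfl, PySem.List.pySetD_natCast]
    apply List.ext_getElem
    · simp
    intro i h1 h2
    rw [List.getElem_set]
    simp only [List.getElem_map, List.getElem_range, List.getElem_replicate]
    rw [hkG]
    by_cases hi : i = 0
    · subst hi; simp
    · simp [hi, Ne.symm hi]
  · have hknot1 : ¬((k : Int) = 1) := by exact_mod_cast hk1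
    rw [if_neg hknot1]
    by_cases hk0 : k.testBit 0 = true
    case neg =>
      have hband : ¬(PySem.Int.band ((k : Int)) 1 ≠ 0) := by
        have h1 : (1 : Int) = ((1 : Nat) : Int) := rfl
        rw [h1, PySem.Int.band_natCast, Nat.and_one_is_mod]
        rw [Nat.testBit_zero] at hk0
        simp at hk0 ⊢
        omega
      rw [if_neg hband]
      apply List.ext_getElem
      · simp
      intro i h1 h2
      simp only [List.getElem_map, List.getElem_range, List.getElem_replicate]
      rw [hkG, if_neg hk1, dif_neg (by simp [hk0])]
    case pos =>
      have hband : PySem.Int.band ((k : Int)) 1 ≠ 0 := by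
        have h1 : (1 : Int) = ((1 : Nat) : Int) := rfl
        rw [h1, PySem.Int.band_natCast, Nat.and_one_is_mod]
        rw [Nat.testBit_zero] at hk0
        simp at hk0 ⊢
        omega
      rw [if_pos hband]
      obtain ⟨hlen, hent⟩ := writeFold_spec
        (fun i => PySem.Int.band ((k : Int) >>> ((i.toNat : Nat) : Int)) 1 ≠ 0)
        (fun i => hkBestB matrix dp
          (PySem.Int.bxor (k : Int) ((1 : Int) <<< i.toNat)) i)
        matrix.length (List.replicate matrix.length none) (by simp)
      apply List.ext_getElem
      · rw [hlen]; simp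
      intro i h1 h2
      have hin : i < matrix.length := by simpa using h2
      have hient := hent i (by simpa using hin)
      rw [PySem.List.pyGetD_natCast,
          List.getD_eq_getElem _ _ (by rw [hlen]; simpa using hin)] at hient
      rw [hient]
      simp only [List.getElem_map, List.getElem_range]
      by_cases hcase : (1 ≤ i ∧ i < matrix.length) ∧
          PySem.Int.band ((k : Int) >>> ((((i : Int)).toNat : Nat) : Int)) 1 ≠ 0
      · rw [if_pos hcase]
        have hbit : k.testBit i = true := by
          have hb2 := hcase.2
          rw [Int.toNat_natCast] at hb2
          exact (band_shift_cond k i).1 hb2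
        rw [bestFold_eq matrix k i hin hbit dp hdp]
        rw [hkG_eq_candFold matrix k i hk1 hk0 ⟨hcase.1.1, hin, hbit⟩]
      · rw [if_neg hcase]
        rw [PySem.List.pyGetD_natCast, List.getD_eq_getElem _ _ (by simp [hin]),
            List.getElem_replicate]
        rw [hkG, if_neg hk1, dif_pos hk0]
        rw [dif_neg ?_]
        intro ⟨hg1, hg2, hg3⟩
        exact hcase ⟨⟨hg1, hg2⟩, by
          rw [Int.toNat_natCast]
          exact (band_shift_cond k i).2 hg3⟩

theorem dp_eq (matrix : List (List Int)) :
    ∀ K : Nat,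
      (PySem.List.pyRange 0 (K : Int) 1).foldl
        (fun dp mask => dp ++ [hkRowB matrix dp mask]) []
      = (List.range K).map (fun m => (List.range matrix.length).map (hkG matrix m)) := by
  intro K
  induction K with
  | zero => simp [PySem.List.pyRange_one_eq_nil]
  | succ K ih =>
    have hsucc : ((K + 1 : Nat) : Int) = (K : Int) + 1 := by push_cast; ring
    rw [hsucc, PySem.List.pyRange_one_succ_right (by omega), List.foldl_append]
    simp only [List.foldl_cons, List.foldl_nil]
    rw [ih, hkRow_eq matrix K _ rfl, List.range_succ, List.map_append, List.map_singleton]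

theorem B_eq_resFold (matrix : List (List Int)) (hn : 0 < matrix.length) :
    bruteForceRoundTable_alt matrix =
      (List.range matrix.length).foldl (fun res last =>
        match hkG matrix (2 ^ matrix.length - 1) last with
        | none => res
        | some v => max res (v + wN matrix 0 last)) 0 := by
  unfold bruteForceRoundTable_alt hkResB
  rw [if_neg (by omega)]
  rw [cast_one_shiftLeft matrix.length, dp_eq matrix (2 ^ matrix.length)]
  have hdpne : (List.range (2 ^ matrix.length)).map
      (fun m => (List.range matrix.length).map (hkG matrix m)) ≠ [] := by
    simp [List.map_eq_nil_iff, List.range_eq_nil]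
  have hlastrow : PySem.List.pyGetD ((List.range (2 ^ matrix.length)).map
      (fun m => (List.range matrix.length).map (hkG matrix m))) (-1) []
      = (List.range matrix.length).map (hkG matrix (2 ^ matrix.length - 1)) := by
    rw [PySem.List.pyGetD_neg_one _ _ hdpne]
    rw [List.getLast_eq_getElem hdpne]
    simp only [List.length_map, List.length_range, List.getElem_map, List.getElem_range]
  rw [hlastrow, PySem.List.pyRange_zero_natCast, List.foldl_map]
  refine PySem.List.foldl_congr_mem _ _ _ _ ?_
  intro res p hp
  have hpn : p < matrix.length := List.mem_range.1 hp
  rw [PySem.List.pyGetD_natCast, PySem.List.getD_map_range _ _ _ _ hpn]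
  cases hkG matrix (2 ^ matrix.length - 1) p with
  | none => rfl
  | some v =>
    show max res (v + PySem.List.pyGetD (PySem.List.pyGetD matrix 0 []) ((p : Nat) : Int) 0)
      = max res (v + wN matrix 0 p)
    unfold wN
    norm_num

-- ---------- resFold bounds ----------

theorem resFold_le (g : Nat → Option Int) (ad : Nat → Int) (l : List Nat) (init c : Int)
    (h0 : init ≤ c) (h : ∀ x ∈ l, ∀ v, g x = some v → v + ad x ≤ c) :
    l.foldl (fun res last =>
      match g last with
      | none => res
      | some v => max res (v + ad last)) init ≤ c := by
  induction l generalizing init with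
  | nil => simpa using h0
  | cons x t ih =>
    simp only [List.foldl_cons]
    cases hgx : g x with
    | none => exact ih _ h0 (fun y hy => h y (by simp [hy]))
    | some v =>
      exact ih _ (max_le h0 (h x (by simp) v hgx)) (fun y hy => h y (by simp [hy]))

theorem le_resFold (g : Nat → Option Int) (ad : Nat → Int) (l : List Nat) (init : Int) :
    init ≤ l.foldl (fun res last =>
      match g last with
      | none => res
      | some v => max res (v + ad last)) init ∧
    ∀ x ∈ l, ∀ v, g x = some v → v + ad x ≤ l.foldl (fun res last =>
      match g last with
      | none => res
      | some v => max res (v + ad last)) init := by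
  induction l generalizing init with
  | nil => simp
  | cons x t ih =>
    simp only [List.foldl_cons]
    cases hgx : g x with
    | none =>
      refine ⟨(ih init).1, fun y hy v hv => ?_⟩
      rcases List.mem_cons.1 hy with rfl | hy
      · rw [hgx] at hv; cases hv
      · exact (ih init).2 y hy v hv
    | some v =>
      constructor
      · exact le_trans (le_max_left _ _) (ih _).1
      · intro y hy v' hv'
        rcases List.mem_cons.1 hy with rfl | hy
        · rw [hgx] at hv'; injection hv' with hv'; subst hv'
          exact le_trans (le_max_right _ _) (ih _).1
        · exact (ih _).2 y hy v' hv'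

theorem cycW_map {α β : Type} (w : β → β → Int) (f : α → β) (d : α) (l : List α) :
    cycW w (f d) (l.map f) = cycW (fun a b => w (f a) (f b)) d l := by
  unfold cycW
  rw [chainW_map, List.headD_map, List.getLastD_map]

theorem map_toNat_cast (p : List Int) (h : ∀ x ∈ p, 0 ≤ x) :
    (p.map Int.toNat).map (fun x : Nat => (x : Int)) = p := by
  rw [List.map_map]
  conv_rhs => rw [← List.map_id p]
  exact List.map_congr_left (fun x hx => Int.toNat_of_nonneg (h x hx))

theorem mem_map_cast_iff (l : List Nat) (x : Nat) :
    ((x : Int) ∈ l.map (fun y : Nat => (y : Int))) ↔ x ∈ l := by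
  constructor
  · intro hx
    obtain ⟨y, hy, hxy⟩ := List.mem_map.1 hx
    have : y = x := by exact_mod_cast hxy
    subst this; exact hy
  · intro hx; exact List.mem_map.2 ⟨x, hx, rfl⟩

-- the two fold shapes of the final comparison
theorem main_eq (matrix : List (List Int)) (hn : 0 < matrix.length) :
    bruteForceRoundTable matrix = bruteForceRoundTable_alt matrix := by
  rw [B_eq_resFold matrix hn]
  unfold bruteForceRoundTable
  set n := matrix.length with hndef
  set xs := PySem.List.pyRange 0 (n : Int) 1 with hxsdef
  have hxslen : xs.length = n := by
    rw [hxsdef, PySem.List.length_pyRange_one]; omega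
  have hxsnodup : xs.Nodup := PySem.List.nodup_pyRange_one _ _
  have hmemxs : ∀ x : Int, x ∈ xs ↔ 0 ≤ x ∧ x < (n : Int) := by
    intro x; rw [hxsdef]; exact PySem.List.mem_pyRange_one
  set FULL := 2 ^ n - 1 with hfull
  have htb : ∀ x : Nat, FULL.testBit x = true ↔ x < n := by
    intro x; rw [hfull, Nat.testBit_two_pow_sub_one]; simp
  set g : Nat → Option Int := fun last => hkG matrix FULL last with hg
  set ad : Nat → Int := fun last => wN matrix 0 last with had
  set RES := (List.range n).foldl (fun res last =>
      match g last with
      | none => res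
      | some v => max res (v + ad last)) 0 with hres
  set f : List Int → Int := fun perm => xs.foldl
      (fun util i =>
        util + PySem.List.pyGetD
                 (PySem.List.pyGetD matrix (PySem.List.pyGetD perm i 0) [])
                 (PySem.List.pyGetD perm (i - 1) 0) 0) 0 with hf
  rw [show (fun (maxUtil : Int) (perm : List Int) =>
      let util := xs.foldl
        (fun util i =>
          util + PySem.List.pyGetD
                   (PySem.List.pyGetD matrix (PySem.List.pyGetD perm i 0) [])
                   (PySem.List.pyGetD perm (i - 1) 0) 0) 0
      max util maxUtil) = (fun a x => max (f x) a) from rfl]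
  have hwbridge : (fun a b : Nat => wI matrix (↑a) (↑b)) = wN matrix := rfl
  -- the value of A's inner loop on a member of the permutation list
  have hutil : ∀ p ∈ PySem.List.permutations xs xs.length,
      f p = cycW (wN matrix) 0 (p.map Int.toNat) ∧
      (p.map Int.toNat).Nodup ∧
      (∀ x : Nat, x ∈ p.map Int.toNat ↔ x < n) := by
    intro p hp
    have hperm : p.Perm xs := PySem.List.perm_of_mem_permutations hp
    have hplen : p.length = n := by rw [hperm.length_eq, hxslen]
    have hpne : p ≠ [] := by
      intro hcon; rw [hcon] at hplen; simp at hplen; omega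
    have hnonneg : ∀ x ∈ p, 0 ≤ x := fun x hx => ((hmemxs x).1 (hperm.mem_iff.1 hx)).1
    have hmapcast : (p.map Int.toNat).map (fun x : Nat => (x : Int)) = p :=
      map_toNat_cast p hnonneg
    refine ⟨?_, ?_, ?_⟩
    · have h1 : f p = cycW (wI matrix) 0 p := by
        rw [hf]
        have := utilA_eq matrix p hpne
        rw [show ((p.length : Int)) = ((n : Int)) by exact_mod_cast congrArg Nat.cast hplen] at this
        exact this
      rw [h1, ← hwbridge, ← cycW_map (wI matrix) (fun x : Nat => (x : Int)) 0 (p.map Int.toNat),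
          hmapcast]
      norm_num
    · refine List.Nodup.of_map (fun x : Nat => (x : Int)) ?_
      rw [hmapcast]; exact hperm.nodup_iff.2 hxsnodup
    · intro x
      rw [← mem_map_cast_iff, hmapcast, hperm.mem_iff, hmemxs]
      constructor
      · intro h; exact_mod_cast h.2
      · intro h; exact ⟨by positivity, by exact_mod_cast h⟩
  apply le_antisymm
  · -- A ≤ B: every permutation's cycle weight is counted in the DP result
    refine foldl_maxflip_le _ f 0 RES (le_resFold g ad (List.range n) 0).1 ?_
    intro p hp
    obtain ⟨hfval, hnd, hmem⟩ := hutil p hp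
    set pn := p.map Int.toNat with hpn
    have h0pn : (0 : Nat) ∈ pn := (hmem 0).2 hn
    obtain ⟨l1, l2, hsplit⟩ := List.append_of_mem h0pn
    set q : List Nat := (0 :: l2) ++ l1 with hq
    have hqperm : pn.Perm q := by rw [hsplit, hq]; exact List.perm_append_comm
    have hrot : cycW (wN matrix) 0 pn = cycW (wN matrix) 0 q := by
      rw [hsplit, hq]; exact cycW_rotate (wN matrix) 0 l1 (0 :: l2)
    have hqne : q ≠ [] := by simp [hq]
    set ql := q.getLastD 0 with hql
    have hqlast : q.getLast? = some ql := by
      rw [hql, List.getLastD_eq_getLast?]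
      cases hc : q.getLast? with
      | none => rw [List.getLast?_eq_none_iff] at hc; exact absurd hc hqne
      | some z => rfl
    have hqpath : isPath n FULL ql q := by
      refine ⟨hqperm.nodup_iff.1 hnd, by rw [hq]; rfl, hqlast, ?_⟩
      intro x
      rw [← hqperm.mem_iff, hmem x, htb x]
      omega
    obtain ⟨v, hGv, hle⟩ := hkG_complete matrix hn FULL
      (fun x hx => (htb x).1 hx) ql q hqpath
    have hqln : ql < n :=
      ((hqpath.2.2.2 ql).1 (List.mem_of_getLast? hqlast)).1
    have hterm := (le_resFold g ad (List.range n) 0).2 ql (List.mem_range.2 hqln) v hGv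
    have hhead : q.headD 0 = 0 := by rw [hq]; rfl
    calc f p = cycW (wN matrix) 0 q := by rw [hfval, hrot]
    _ = chainW (wN matrix) q + wN matrix 0 ql := by
        unfold cycW; rw [hhead, ← hql]
    _ ≤ v + ad ql := by
        show chainW (wN matrix) q + wN matrix 0 ql ≤ v + wN matrix 0 ql
        omega
    _ ≤ RES := hterm
  · -- B ≤ A: every DP value is attained by some permutation
    refine resFold_le g ad (List.range n) 0 _
      (le_foldl_maxflip (PySem.List.permutations xs xs.length) f 0).1 ?_
    intro last hlast v hGv
    have hlastn : last < n := List.mem_range.1 hlast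
    obtain ⟨l, ⟨hnd, hhd, hgl, hmem⟩, hchain⟩ := hkG_attain matrix hn FULL last v hGv
    have hlne : l ≠ [] := by intro hcon; rw [hcon] at hhd; cases hhd
    set p := l.map (fun x : Nat => (x : Int)) with hp
    have hpnodup : p.Nodup := by
      refine List.Nodup.map (fun a b hab => by exact_mod_cast hab) hnd
    have hpmem : ∀ x : Int, x ∈ p ↔ 0 ≤ x ∧ x < (n : Int) := by
      intro x
      constructor
      · intro hx
        obtain ⟨y, hy, rfl⟩ := List.mem_map.1 hx
        have hyn := ((hmem y).1 hy).1
        exact ⟨by positivity, by exact_mod_cast hyn⟩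
      · intro ⟨hx0, hxn⟩
        have hxnat : x = ((x.toNat : Nat) : Int) := (Int.toNat_of_nonneg hx0).symm
        rw [hxnat, hp, mem_map_cast_iff]
        refine (hmem x.toNat).2 ⟨by omega, (htb x.toNat).2 (by omega)⟩
    have hpperm : p.Perm xs := by
      refine List.perm_of_nodup_nodup_toFinset_eq hpnodup hxsnodup ?_
      ext x
      rw [List.mem_toFinset, List.mem_toFinset, hpmem, hmemxs]
    have hmempermlist : p ∈ PySem.List.permutations xs xs.length :=
      mem_permutations_self xs p hxsnodup hpperm
    obtain ⟨hfval, _, _⟩ := hutil p hmempermlist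
    have hcycle : cycW (wN matrix) 0 (p.map Int.toNat) = v + ad last := by
      have hback : p.map Int.toNat = l := by
        rw [hp, List.map_map]
        conv_rhs => rw [← List.map_id l]
        exact List.map_congr_left (fun x _ => Int.toNat_natCast x)
      rw [hback]
      unfold cycW
      have hh : l.headD 0 = 0 := by
        cases l with
        | nil => cases hhd
        | cons a t => simp at hhd; subst hhd; rfl
      have hgld : l.getLastD 0 = last := by
        rw [List.getLastD_eq_getLast?, hgl]; rfl
      rw [hh, hgld, hchain, had]
    have := (le_foldl_maxflip (PySem.List.permutations xs xs.length) f 0).2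
      p hmempermlist
    rw [hfval, hcycle] at this
    exact this

-- ===== VERDICT (by name: the statement is the Claim_ definition above) =====
theorem bruteForceRoundTable_spec : Claim_equal_bruteForceRoundTable := by
  intro matrix _ _
  unfold Spec_bruteForceRoundTable
  rcases Nat.eq_zero_or_pos matrix.length with hn0 | hn
  · have hmat : matrix = [] := List.length_eq_zero_iff.1 hn0
    subst hmat
    rfl
  · exact main_eq matrix hn
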